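-- pv_equiv track=rewrite | github.com/s445961027/sc24_SW_TNC | check_pos.py | pick_realStem
-- ===== SOURCE A (Python) =====
-- def pick_realStem(stems):
-- 	start_pos=[]
-- 	all_stem_length=[]
-- 	stem_real=[]
--
-- 	for i,stem in enumerate(stems):
-- 		all_stem_length.append(len(stem))
--
-- 		if len(stem) >= 3:
-- 			stem_real.append(i)
-- 		if i == 0:
-- 			start_pos.append(0)
-- 			continue
-- 		else:
-- 			start_pos.append( start_pos[i-1] + all_stem_length[i-1] )
--
-- 	stem_start_in_path = []
-- 	stem_length = []
--
-- 	for real_stem in stem_real: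
-- 		stem_start_in_path.append( start_pos[real_stem] )
-- 		stem_length.append( all_stem_length[real_stem])
--
-- 	return stem_start_in_path, stem_length
-- ===== SOURCE B (Python) =====
-- def pick_realStem(stems):
--     starts = []
--     lengths = []
--     offset = 0
--     for stem in stems:
--         L = len(stem)
--         if L >= 3:
--             starts.append(offset)
--             lengths.append(L)
--         offset += L
--     return starts, lengths
-- ===== Notes on version B (the rewrite author's own statement) =====
-- stated objective: simpler
-- what changed: Replaces the two-phase algorithm (build full start-position, length and qualifying-index arrays over all stems, then a second gather loop indexing back into them) with one fused pass that carries a running offset and appends directly to the two result lists; no intermediate arrays and no second loop.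
import Mathlib
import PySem

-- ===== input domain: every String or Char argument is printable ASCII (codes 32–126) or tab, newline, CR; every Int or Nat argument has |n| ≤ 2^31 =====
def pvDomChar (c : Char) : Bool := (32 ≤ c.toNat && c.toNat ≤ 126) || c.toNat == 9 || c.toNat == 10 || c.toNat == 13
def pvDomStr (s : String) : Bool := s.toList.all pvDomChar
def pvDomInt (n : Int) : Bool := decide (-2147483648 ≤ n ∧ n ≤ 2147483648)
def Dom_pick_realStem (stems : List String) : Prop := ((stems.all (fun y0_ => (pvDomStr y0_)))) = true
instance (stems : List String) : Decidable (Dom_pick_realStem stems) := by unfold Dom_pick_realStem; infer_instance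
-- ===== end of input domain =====

-- B fuses A's two phases into one pass with a running offset (objective: simpler); both are pure and total.

-- ===== PORT A =====
-- body of A's first loop (state: start_pos, all_stem_length, stem_real).  `pyGetD … 0` is
-- exact here: A reads index i-1 with i ≥ 1 into lists of length ≥ i, so Python never raises
-- and the default 0 is never used.
def pvStepA (acc : List Int × List Int × List Int) (p : Int × String) : List Int × List Int × List Int :=
  let start_pos := acc.1
  let all_len := acc.2.1
  let stem_real := acc.2.2
  let i := p.1
  let stem := p.2
  let all_len := all_len ++ [PySem.Str.len stem]
  let stem_real := if PySem.Str.len stem ≥ 3 then stem_real ++ [i] else stem_real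
  let start_pos :=
    if i = 0 then start_pos ++ [0]
    else start_pos ++ [PySem.List.pyGetD start_pos (i - 1) 0 + PySem.List.pyGetD all_len (i - 1) 0]
  (start_pos, all_len, stem_real)

-- literal port of A: first loop over enumerate(stems), then the gather loop over stem_real
-- (indices in stem_real are always in range, so `pyGetD … 0` is exact there too)
def pick_realStem (stems : List String) : List Int × List Int :=
  let st := (PySem.List.enumerate stems 0).foldl pvStepA ([], [], [])
  st.2.2.foldl
    (fun (acc : List Int × List Int) r =>
      (acc.1 ++ [PySem.List.pyGetD st.1 r 0], acc.2 ++ [PySem.List.pyGetD st.2.1 r 0]))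
    ([], [])

-- ===== PORT B =====
-- body of B's single loop (state: starts, lengths, offset)
def pvStepB (acc : List Int × List Int × Int) (stem : String) : List Int × List Int × Int :=
  let L := PySem.Str.len stem
  let acc2 := if L ≥ 3 then (acc.1 ++ [acc.2.2], acc.2.1 ++ [L]) else (acc.1, acc.2.1)
  (acc2.1, acc2.2, acc.2.2 + L)

def pick_realStem_alt (stems : List String) : List Int × List Int :=
  let st := stems.foldl pvStepB ([], [], 0)
  (st.1, st.2.1)

-- ===== PRECONDITION & SPEC =====
def Spec_pick_realStem (stems : List String) (out : List Int × List Int) : Prop := out = pick_realStem_alt stems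
instance (stems : List String) (out : List Int × List Int) : Decidable (Spec_pick_realStem stems out) := by unfold Spec_pick_realStem; infer_instance

-- ===== CLAIM (what is proved, stated in full; the proofs are below) =====
def Claim_equal_pick_realStem : Prop := ∀ (stems : List String), Dom_pick_realStem stems → Spec_pick_realStem stems (pick_realStem stems)

-- ===== LEMMAS AND PROOFS =====

-- total length of a list of stems
def sumL (xs : List String) : Int := (xs.map PySem.Str.len).sum

-- the start-position array A builds (prefix sums of lengths)
def startsAux (off : Int) : List String → List Int
  | [] => []
  | s :: r => off :: startsAux (off + PySem.Str.len s) r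

-- the lengths array A builds
def lensOf (xs : List String) : List Int := xs.map PySem.Str.len

-- the indices of long stems A collects
def realsAux (i : Int) : List String → List Int
  | [] => []
  | s :: r => (if PySem.Str.len s ≥ 3 then [i] else []) ++ realsAux (i + 1) r

-- the common result value: starts and lengths of long stems, starting at offset `off`
def specB (off : Int) : List String → List Int × List Int
  | [] => ([], [])
  | s :: r =>
      let L := PySem.Str.len s
      let t := specB (off + L) r
      if L ≥ 3 then (off :: t.1, L :: t.2) else t

theorem sumL_nil : sumL [] = 0 := rfl

theorem sumL_cons (s : String) (r : List String) : sumL (s :: r) = PySem.Str.len s + sumL r := by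
  simp [sumL]

theorem sumL_append (xs ys : List String) : sumL (xs ++ ys) = sumL xs + sumL ys := by
  induction xs with
  | nil => simp [sumL]
  | cons s r ih => simp only [List.cons_append, sumL_cons, ih]; ring

theorem startsAux_snoc (off : Int) (xs : List String) (s : String) :
    startsAux off (xs ++ [s]) = startsAux off xs ++ [off + sumL xs] := by
  induction xs generalizing off with
  | nil => simp [startsAux, sumL]
  | cons p r ih => simp only [List.cons_append, startsAux, ih, sumL_cons, List.cons_append]; ring_nf

theorem realsAux_snoc (i : Int) (xs : List String) (s : String) :
    realsAux i (xs ++ [s]) =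
      realsAux i xs ++ (if PySem.Str.len s ≥ 3 then [i + xs.length] else []) := by
  induction xs generalizing i with
  | nil => simp [realsAux]
  | cons p r ih =>
      simp only [List.cons_append, realsAux, ih, List.length_cons]
      split_ifs <;> simp <;> ring_nf

theorem lensOf_append (xs ys : List String) : lensOf (xs ++ ys) = lensOf xs ++ lensOf ys := by
  simp [lensOf]

theorem startsAux_read (pre : List String) (s : String) (rest : List String) (off : Int) :
    PySem.List.pyGetD (startsAux off (pre ++ s :: rest)) ((pre.length : Int)) 0 = off + sumL pre := by
  induction pre generalizing off with
  | nil => simp [startsAux, sumL, PySem.List.pyGetD_zero_cons]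
  | cons p r ih =>
      have hc : ((p :: r).length : Int) = ((r.length + 1 : Nat) : Int) := by simp
      rw [hc]
      simp only [List.cons_append, startsAux, PySem.List.pyGetD_natCast, List.getD_cons_succ]
      have h2 := ih (off + PySem.Str.len p)
      rw [PySem.List.pyGetD_natCast] at h2
      rw [h2, sumL_cons]; ring

theorem lensOf_read (pre : List String) (s : String) (rest : List String) :
    PySem.List.pyGetD (lensOf (pre ++ s :: rest)) ((pre.length : Int)) 0 = PySem.Str.len s := by
  rw [PySem.List.pyGetD_natCast, lensOf_append]
  have h : pre.length = (lensOf pre).length := by simp [lensOf]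
  rw [List.getD_eq_getElem?_getD, h, List.getElem?_append_right (le_refl _)]
  simp [lensOf]

-- one step of A's first loop advances the three arrays by one stem
theorem stepA_eq (pre : List String) (s : String) :
    pvStepA (startsAux 0 pre, lensOf pre, realsAux 0 pre) ((pre.length : Int), s)
      = (startsAux 0 (pre ++ [s]), lensOf (pre ++ [s]), realsAux 0 (pre ++ [s])) := by
  rcases List.eq_nil_or_concat pre with rfl | ⟨ys, y, rfl⟩
  · simp [pvStepA, startsAux, lensOf, realsAux]
  · simp only [List.concat_eq_append]
    have hlen : (ys ++ [y]).length = ys.length + 1 := by simp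
    have hne : (((ys ++ [y]).length : Nat) : Int) ≠ 0 := by rw [hlen]; push_cast; omega
    have hidx : (((ys ++ [y]).length : Nat) : Int) - 1 = (ys.length : Int) := by
      rw [hlen]; push_cast; ring
    have hlen2 : lensOf (ys ++ [y]) ++ [PySem.Str.len s] = lensOf (ys ++ y :: [s]) := by
      simp [lensOf]
    simp only [pvStepA]
    rw [if_neg hne, hidx, hlen2]
    rw [startsAux_read ys y [] 0, lensOf_read ys y [s]]
    have hs : 0 + sumL ys + PySem.Str.len y = 0 + sumL (ys ++ [y]) := by
      rw [sumL_append, sumL_cons, sumL_nil]; ring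
    have e1 : startsAux 0 ((ys ++ [y]) ++ [s]) = startsAux 0 (ys ++ [y]) ++ [0 + sumL (ys ++ [y])] :=
      startsAux_snoc 0 (ys ++ [y]) s
    have e3 := realsAux_snoc 0 (ys ++ [y]) s
    rw [e1, e3, hs]
    split_ifs <;> simp [lensOf]

-- A's first loop computes exactly the three arrays
theorem loopA1 (rest pre : List String) :
    (PySem.List.enumerate rest (pre.length : Int)).foldl pvStepA
      (startsAux 0 pre, lensOf pre, realsAux 0 pre)
    = (startsAux 0 (pre ++ rest), lensOf (pre ++ rest), realsAux 0 (pre ++ rest)) := by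
  induction rest generalizing pre with
  | nil => simp [PySem.List.enumerate]
  | cons s r ih =>
      rw [PySem.List.enumerate_cons, List.foldl_cons, stepA_eq]
      have hc : (pre.length : Int) + 1 = (((pre ++ [s]).length : Nat) : Int) := by simp
      rw [hc, ih (pre ++ [s])]
      simp

-- A's gather loop is a double map
theorem gatherA (SP AL : List Int) (l : List Int) (a b : List Int) :
    l.foldl (fun (acc : List Int × List Int) r =>
      (acc.1 ++ [PySem.List.pyGetD SP r 0], acc.2 ++ [PySem.List.pyGetD AL r 0])) (a, b)
    = (a ++ l.map (fun r => PySem.List.pyGetD SP r 0),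
       b ++ l.map (fun r => PySem.List.pyGetD AL r 0)) := by
  induction l generalizing a b with
  | nil => simp
  | cons x t ih => simp [List.foldl_cons, ih]

-- gathering the long-stem indices out of the full arrays yields specB
theorem gatherSpec (rest pre : List String) :
    ((realsAux (pre.length : Int) rest).map
        (fun r => PySem.List.pyGetD (startsAux 0 (pre ++ rest)) r 0),
     (realsAux (pre.length : Int) rest).map
        (fun r => PySem.List.pyGetD (lensOf (pre ++ rest)) r 0))
    = specB (sumL pre) rest := by
  induction rest generalizing pre with
  | nil => simp [realsAux, specB]
  | cons s r ih =>
      have hc : (pre.length : Int) + 1 = (((pre ++ [s]).length : Nat) : Int) := by simp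
      have hl : pre ++ s :: r = (pre ++ [s]) ++ r := by simp
      have ih' := ih (pre ++ [s])
      rw [← hc, ← hl, sumL_append] at ih'
      simp only [realsAux, specB]
      split_ifs with h
      · simp only [List.singleton_append, List.map_cons]
        rw [startsAux_read pre s r 0, lensOf_read pre s r]
        rw [Prod.mk.injEq] at ih' ⊢
        constructor
        · rw [ih'.1]; simp [sumL]
        · rw [ih'.2]; simp [sumL]
      · simpa [sumL] using ih'

-- B's loop equals specB with an accumulator
theorem stepB_pos (a b : List Int) (off : Int) (s : String) (h : PySem.Str.len s ≥ 3) :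
    pvStepB (a, b, off) s = (a ++ [off], b ++ [PySem.Str.len s], off + PySem.Str.len s) := by
  simp only [pvStepB]
  rw [if_pos h]

theorem stepB_neg (a b : List Int) (off : Int) (s : String) (h : ¬ PySem.Str.len s ≥ 3) :
    pvStepB (a, b, off) s = (a, b, off + PySem.Str.len s) := by
  simp only [pvStepB]
  rw [if_neg h]

theorem loopB (xs : List String) (a b : List Int) (off : Int) :
    xs.foldl pvStepB (a, b, off)
    = (a ++ (specB off xs).1, b ++ (specB off xs).2, off + sumL xs) := by
  induction xs generalizing a b off with
  | nil => simp [specB, sumL]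
  | cons s r ih =>
      rw [List.foldl_cons]
      by_cases h : PySem.Str.len s ≥ 3
      · rw [stepB_pos a b off s h, ih]
        simp only [specB, if_pos h, sumL_cons]
        refine Prod.ext (by simp) (Prod.ext (by simp) (by simp; ring))
      · rw [stepB_neg a b off s h, ih]
        simp only [specB, if_neg h, sumL_cons]
        refine Prod.ext (by simp) (Prod.ext (by simp) (by simp; ring))

-- ===== VERDICT (by name: the statement is the Claim_ definition above) =====
theorem pick_realStem_spec : Claim_equal_pick_realStem := by
  intro stems _
  unfold Spec_pick_realStem pick_realStem pick_realStem_alt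
  have h1 := loopA1 stems []
  have h0 : (startsAux 0 ([] : List String), lensOf [], realsAux 0 [])
      = (([] : List Int), ([] : List Int), ([] : List Int)) := by simp [startsAux, lensOf, realsAux]
  rw [h0] at h1
  simp only [List.length_nil, Nat.cast_zero, List.nil_append] at h1
  rw [h1]
  have h2 := gatherSpec stems []
  simp only [List.length_nil, Nat.cast_zero, List.nil_append, sumL_nil] at h2
  have h3 := loopB stems [] [] 0
  simp only [List.nil_append] at h3
  rw [gatherA, h3]
  simp only [List.nil_append]
  exact Prod.ext (congrArg Prod.fst h2) (congrArg Prod.snd h2)
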